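-- pv_equiv track=rewrite | github.com/CODE-U-S/Coding_Test_Study | 2st/Riyeon/코드 처리하기.py | solution
-- ===== SOURCE A (Python) =====
-- def solution(code):
--     mode = 0
--     ret = ''
--     for i in range(len(code)):
--         if mode == 0:
--             if code[i] == '1':
--                 mode = 1
--             elif i % 2 == 0:
--                 ret += code[i]
--         else:
--             if code[i] == '1':
--                 mode = 0
--             elif i % 2 == 1:
--                 ret += code[i]
--     return ret if len(ret) != 0 else 'EMPTY'
-- ===== SOURCE B (Python) =====
-- def solution(code):
--     n = len(code)
--     ones = [0] * (n + 1)
--     for i, ch in enumerate(code):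
--         ones[i + 1] = ones[i] + (ch == '1')
--     kept = [code[i] for i in range(n) if code[i] != '1' and i % 2 == ones[i] % 2]
--     s = ''.join(kept)
--     return s if s else 'EMPTY'
-- ===== Notes on version B (the rewrite author's own statement) =====
-- stated objective: alternative
-- what changed: Replaced the mutable mode state machine with a precomputed prefix table of one-counts plus a stateless parity-filtering pass over the indices.
import Mathlib
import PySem

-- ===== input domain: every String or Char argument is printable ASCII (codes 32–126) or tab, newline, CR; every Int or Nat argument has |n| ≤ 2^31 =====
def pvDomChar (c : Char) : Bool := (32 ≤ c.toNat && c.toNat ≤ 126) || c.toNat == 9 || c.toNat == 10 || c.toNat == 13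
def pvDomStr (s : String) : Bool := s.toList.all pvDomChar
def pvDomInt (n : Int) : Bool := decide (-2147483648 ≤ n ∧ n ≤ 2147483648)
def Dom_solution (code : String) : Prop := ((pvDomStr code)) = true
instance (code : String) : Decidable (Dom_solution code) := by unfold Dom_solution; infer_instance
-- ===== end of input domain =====

-- B replaces A's mutable mode state machine by a precomputed prefix table of
-- '1'-counts plus a stateless filtering pass; alternative decomposition, same cost.

-- ===== PORT A =====
-- the for-loop over range(len(code)): state (i, mode, ret), branches in A's order
def solutionGo : List Char → Nat → Nat → List Char → List Char
  | [], _, _, ret => ret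
  | c :: t, i, mode, ret =>
    if mode = 0 then
      if c = '1' then solutionGo t (i + 1) 1 ret
      else if i % 2 = 0 then solutionGo t (i + 1) mode (ret ++ [c])
      else solutionGo t (i + 1) mode ret
    else
      if c = '1' then solutionGo t (i + 1) 0 ret
      else if i % 2 = 1 then solutionGo t (i + 1) mode (ret ++ [c])
      else solutionGo t (i + 1) mode ret

def solution (code : String) : String :=
  let ret := solutionGo code.toList 0 0 []
  if ret.length ≠ 0 then String.ofList ret else "EMPTY"

-- ===== PORT B =====
-- ones prefix table: ones[i] = number of '1' among code[:i]  (scanl materialises the table)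
def onesTable (cs : List Char) : List Nat :=
  cs.scanl (fun a c => a + (if c = '1' then 1 else 0)) 0

def solution_alt (code : String) : String :=
  let cs := code.toList
  let kept := ((cs.zipIdx).zip (onesTable cs)).filterMap
    (fun p => if p.1.1 ≠ '1' ∧ p.1.2 % 2 = p.2 % 2 then some p.1.1 else none)
  let s := String.ofList kept
  if s ≠ "" then s else "EMPTY"

-- ===== PRECONDITION & SPEC =====
def Spec_solution (code : String) (out : String) : Prop := out = solution_alt code
instance (code : String) (out : String) : Decidable (Spec_solution code out) := by unfold Spec_solution; infer_instance

-- ===== CLAIM (what is proved, stated in full; the proofs are below) =====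
def Claim_equal_solution : Prop := ∀ (code : String), Dom_solution code → Spec_solution code (solution code)

-- ===== LEMMAS AND PROOFS =====

-- reference selection: characters kept starting at index i with current mode m ∈ {0,1}
def sel : List Char → Nat → Nat → List Char
  | [], _, _ => []
  | c :: t, i, m =>
    if c = '1' then sel t (i + 1) (1 - m)
    else if i % 2 = m then c :: sel t (i + 1) m
    else sel t (i + 1) m

theorem solutionGo_eq_sel (cs : List Char) : ∀ (i m : Nat) (ret : List Char),
    m = 0 ∨ m = 1 → solutionGo cs i m ret = ret ++ sel cs i m := by
  induction cs with
  | nil => intro i m ret _; simp [solutionGo, sel]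
  | cons c t ih =>
    intro i m ret hm
    rcases hm with hm | hm <;> subst hm <;> by_cases h1 : c = '1'
    · simp [solutionGo, sel, h1, ih _ 1 ret (Or.inr rfl)]
    · by_cases hp : i % 2 = 0
      · simp [solutionGo, sel, h1, hp, ih (i + 1) 0 (ret ++ [c]) (Or.inl rfl)]
      · simp [solutionGo, sel, h1, hp, ih (i + 1) 0 ret (Or.inl rfl)]
    · simp [solutionGo, sel, h1, ih _ 0 ret (Or.inl rfl)]
    · by_cases hp : i % 2 = 1
      · simp [solutionGo, sel, h1, hp, ih (i + 1) 1 (ret ++ [c]) (Or.inr rfl)]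
      · simp [solutionGo, sel, h1, hp, ih (i + 1) 1 ret (Or.inr rfl)]

theorem filter_eq_sel (cs : List Char) : ∀ (i a : Nat),
    ((cs.zipIdx i).zip (cs.scanl (fun a c => a + (if c = '1' then 1 else 0)) a)).filterMap
      (fun p => if p.1.1 ≠ '1' ∧ p.1.2 % 2 = p.2 % 2 then some p.1.1 else none)
      = sel cs i (a % 2) := by
  induction cs with
  | nil => intro i a; simp [sel]
  | cons c t ih =>
    intro i a
    by_cases h1 : c = '1'
    · have h2 : (a + 1) % 2 = 1 - a % 2 := by omega
      simp only [List.zipIdx_cons, List.scanl_cons, List.zip_cons_cons,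
        List.filterMap_cons, sel, h1,]
      rw [show (1:Nat) - a % 2 = (a + 1) % 2 from h2.symm ▸ rfl]
      simpa [h2] using ih (i + 1) (a + 1)
    · by_cases hp : i % 2 = a % 2 <;>
      · simp only [List.zipIdx_cons, List.scanl_cons, List.zip_cons_cons,
          List.filterMap_cons, sel, h1, hp]
        simpa [h1, hp] using ih (i + 1) a

theorem mk_ne_empty_iff (l : List Char) : (String.ofList l ≠ "") ↔ l.length ≠ 0 := by
  constructor
  · intro h hl
    exact h (List.length_eq_zero_iff.mp hl ▸ rfl)
  · intro h he
    have h2 := congrArg String.toList he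
    rw [String.toList_ofList] at h2
    simp [h2] at h

-- ===== VERDICT (by name: the statement is the Claim_ definition above) =====
theorem solution_spec : Claim_equal_solution := by
  intro code _
  unfold Spec_solution
  have hA := solutionGo_eq_sel code.toList 0 0 [] (Or.inl rfl)
  have hB := filter_eq_sel code.toList 0 0
  simp only [List.nil_append] at hA
  simp only [solution, solution_alt, onesTable, hA, hB]
  by_cases h : sel code.toList 0 0 = []
  · have he : String.ofList [] = "" := rfl
    simp [h, he]
  · have hl : (sel code.toList 0 0).length ≠ 0 := by
      cases hs : sel code.toList 0 0 with
      | nil => exact absurd hs h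
      | cons a t => simp
    simp [hl, (mk_ne_empty_iff _).mpr hl]
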